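-- pv_equiv track=rewrite | github.com/gbozelli/MachineLearningStudies | LinearRegression.py | valuesMatrix
-- ===== SOURCE A (Python) =====
-- def valuesMatrix(Matrix,Sample):
--     m = len(Matrix)
--     n = len(Matrix[0])
--     Size = len(Sample)
--     for i in range(0,m):
--         for j in range(0,n):
--             for k in range(0,Size):
--                 Matrix[i][j] += Sample[k]**(i+j)
--     Matrix[0][0] = Size
--     return Matrix
-- ===== SOURCE B (Python) =====
-- def valuesMatrix(Matrix, Sample):
--     m = len(Matrix)
--     n = len(Matrix[0])
--     # precompute the power sum for each exponent e = i+j once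
--     P = [sum(s ** e for s in Sample) for e in range(m + n - 1)]
--     for i in range(m):
--         row = Matrix[i]
--         for j in range(n):
--             row[j] += P[i + j]
--     Matrix[0][0] = len(Sample)
--     return Matrix
-- ===== Notes on version B (the rewrite author's own statement) =====
-- stated objective: faster
-- what changed: B precomputes the power sum of the sample once per exponent e=i+j (m+n-1 values) and adds the cached value to each cell, instead of A's re-summing Sample[k]**(i+j) inside every cell's inner loop.
-- outside the precondition, e.g. on valuesMatrix([[1], []], []): A returns [[0], []], B raises IndexError
import Mathlib
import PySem

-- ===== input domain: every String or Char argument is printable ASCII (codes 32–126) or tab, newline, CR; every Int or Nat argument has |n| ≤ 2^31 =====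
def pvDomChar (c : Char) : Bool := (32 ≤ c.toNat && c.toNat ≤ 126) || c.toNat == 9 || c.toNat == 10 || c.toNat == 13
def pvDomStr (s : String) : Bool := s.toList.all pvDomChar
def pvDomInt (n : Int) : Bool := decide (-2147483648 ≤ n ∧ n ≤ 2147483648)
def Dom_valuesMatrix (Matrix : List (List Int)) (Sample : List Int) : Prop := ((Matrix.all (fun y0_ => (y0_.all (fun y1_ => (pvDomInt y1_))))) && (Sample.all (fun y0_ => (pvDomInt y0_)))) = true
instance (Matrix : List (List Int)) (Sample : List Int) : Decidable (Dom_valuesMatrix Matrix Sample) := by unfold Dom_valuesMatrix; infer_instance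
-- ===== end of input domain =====

-- B replaces A's per-cell re-summation of Sample[k]**(i+j) by one precomputed power sum
-- per exponent (objective: faster). Both Pythons mutate Matrix in place identically; the
-- equivalence proved here is about the return value.

-- ===== PORT A =====
def valuesMatrix (Matrix : List (List Int)) (Sample : List Int) : List (List Int) :=
  let m := Matrix.length
  let n := (Matrix.headD []).length
  let Size := Sample.length
  let M := (List.range m).foldl (fun M i =>
    (List.range n).foldl (fun M j =>
      (List.range Size).foldl (fun M k =>
        M.set i ((M.getD i []).set j ((M.getD i []).getD j 0 + (Sample.getD k 0) ^ (i + j)))) M) M) Matrix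
  M.set 0 ((M.getD 0 []).set 0 (Size : Int))

-- ===== PORT B =====
def valuesMatrix_alt (Matrix : List (List Int)) (Sample : List Int) : List (List Int) :=
  let m := Matrix.length
  let n := (Matrix.headD []).length
  let P := (List.range (m + n - 1)).map (fun e => (Sample.map (fun s => s ^ e)).sum)
  let M := Matrix.mapIdx (fun i row => row.mapIdx (fun j x => if j < n then x + P.getD (i + j) 0 else x))
  M.set 0 ((M.getD 0 []).set 0 (Sample.length : Int))

-- ===== PRECONDITION & SPEC =====
-- Pre_ excludes inputs where Python A raises (empty Matrix or empty first row, and ragged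
-- matrices with a later row shorter than the first when Sample is nonempty) and also the
-- ragged short-row matrices with Sample = [] on which A happens to return the input
-- unchanged only because its dead inner loop never indexes — an artefact of A's
-- implementation on which B's own indexing raises IndexError.
def Pre_valuesMatrix (Matrix : List (List Int)) (Sample : List Int) : Prop :=
  Matrix ≠ [] ∧ 0 < (Matrix.headD []).length ∧
    ∀ row ∈ Matrix, (Matrix.headD []).length ≤ row.length
instance (Matrix : List (List Int)) (Sample : List Int) : Decidable (Pre_valuesMatrix Matrix Sample) := by
  unfold Pre_valuesMatrix; infer_instance
def pvWitness_valuesMatrix : List (List Int) × List Int := ([[1, 2], [3, 4]], [2, -1])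

def Spec_valuesMatrix (Matrix : List (List Int)) (Sample : List Int) (out : List (List Int)) : Prop := out = valuesMatrix_alt Matrix Sample
instance (Matrix : List (List Int)) (Sample : List Int) (out : List (List Int)) : Decidable (Spec_valuesMatrix Matrix Sample out) := by unfold Spec_valuesMatrix; infer_instance

-- ===== CLAIM (what is proved, stated in full; the proofs are below) =====
def Claim_equal_valuesMatrix : Prop := ∀ (Matrix : List (List Int)) (Sample : List Int), Dom_valuesMatrix Matrix Sample → Pre_valuesMatrix Matrix Sample → Spec_valuesMatrix Matrix Sample (valuesMatrix Matrix Sample)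

-- ===== LEMMAS AND PROOFS =====

-- the power sum of Sample for exponent e
def pvS (Sample : List Int) (e : Nat) : Int := (Sample.map (fun s => s ^ e)).sum

theorem pv_getD_set_self {α : Type} (l : List α) (i : Nat) (a d : α) (h : i < l.length) :
    (l.set i a).getD i d = a := by
  rw [List.getD_eq_getElem _ _ (by simpa using h)]; simp

theorem pv_getD_set_ne {α : Type} (l : List α) (i i' : Nat) (a d : α) (h : i' ≠ i) :
    (l.set i a).getD i' d = l.getD i' d := by
  simp [List.getD_eq_getElem?_getD, List.getElem?_set_ne (h := h.symm)]

theorem pv_set_getD_self {α : Type} (l : List α) (i : Nat) (d : α) (h : i < l.length) :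
    l.set i (l.getD i d) = l := by
  rw [List.getD_eq_getElem _ _ h]; simp

-- collapse A's innermost k-loop into a single addition of the list sum
theorem pv_fold_k (r : List Nat) (c : Nat → Int) :
    ∀ (M : List (List Int)) (i j : Nat), i < M.length → j < (M.getD i []).length →
    r.foldl (fun M k => M.set i ((M.getD i []).set j ((M.getD i []).getD j 0 + c k))) M
      = M.set i ((M.getD i []).set j ((M.getD i []).getD j 0 + (r.map c).sum)) := by
  induction r with
  | nil =>
    intro M i j hi hj
    simp only [List.foldl_nil, List.map_nil, List.sum_nil, add_zero]
    rw [pv_set_getD_self _ _ _ hj, pv_set_getD_self _ _ _ hi]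
  | cons k r ih =>
    intro M i j hi hj
    simp only [List.foldl_cons, List.map_cons, List.sum_cons]
    rw [ih _ i j (by simpa using hi)
        (by rw [pv_getD_set_self _ _ _ _ hi]; simpa using hj)]
    rw [pv_getD_set_self _ _ _ _ hi, pv_getD_set_self _ _ _ _ hj,
        List.set_set, List.set_set, add_assoc]

-- summing f over positions of l equals summing f over l
theorem pv_sum_range (f : Int → Int) (l : List Int) :
    ((List.range l.length).map (fun k => f (l.getD k 0))).sum = (l.map f).sum := by
  induction l with
  | nil => simp
  | cons x xs ih =>
    rw [show (x :: xs).length = xs.length + 1 from rfl, List.range_succ_eq_map]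
    simp only [List.map_cons, List.map_map, List.sum_cons, List.getD_cons_zero]
    have : (fun k => f ((x :: xs).getD k 0)) ∘ Nat.succ = fun k => f (xs.getD k 0) := by
      funext k; simp
    rw [this, ih]

-- a fold that sets index i from the old value at i, over range n, is a guarded mapIdx
theorem pv_fold_set_mapIdx {α : Type} (g : Nat → α → α) (d : α) (n : Nat) :
    ∀ (l : List α), n ≤ l.length →
    (List.range n).foldl (fun xs i => xs.set i (g i (xs.getD i d))) l
      = l.mapIdx (fun i x => if i < n then g i x else x) := by
  induction n with
  | zero =>
    intro l _
    simp only [List.range_zero, List.foldl_nil]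
    apply List.ext_getElem <;> simp
  | succ n ih =>
    intro l h
    rw [List.range_succ, List.foldl_append, ih l (Nat.le_of_succ_le h)]
    simp only [List.foldl_cons, List.foldl_nil]
    have hn : n < l.length := h
    have hget : (l.mapIdx (fun i x => if i < n then g i x else x)).getD n d = l[n] := by
      rw [List.getD_eq_getElem _ _ (by simpa using hn)]; simp
    rw [hget]
    apply List.ext_getElem
    · simp
    · intro i h1 h2
      simp only [List.getElem_set, List.getElem_mapIdx]
      by_cases hni : n = i
      · subst hni; simp
      · simp only [if_neg hni]
        split_ifs <;> first | rfl | omega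

theorem pv_mapIdx_congr {α β : Type} (f f' : Nat → α → β) (l : List α)
    (h : ∀ i (hi : i < l.length), f i l[i] = f' i l[i]) : l.mapIdx f = l.mapIdx f' := by
  apply List.ext_getElem
  · simp
  · intro i h1 h2
    simp only [List.getElem_mapIdx]
    exact h i (by simpa using h1)

-- hoist A's j-loop to a fold over row i only, with the k-loop collapsed
theorem pv_fold_j (Sample : List Int) (r : List Nat) :
    ∀ (M : List (List Int)) (i : Nat), i < M.length →
    (∀ j ∈ r, j < (M.getD i []).length) →
    r.foldl (fun M j => (List.range Sample.length).foldl (fun M k =>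
        M.set i ((M.getD i []).set j ((M.getD i []).getD j 0 + (Sample.getD k 0) ^ (i + j)))) M) M
      = M.set i (r.foldl (fun row j => row.set j (row.getD j 0 + pvS Sample (i + j))) (M.getD i [])) := by
  induction r with
  | nil =>
    intro M i hi _
    simp only [List.foldl_nil]
    rw [pv_set_getD_self _ _ _ hi]
  | cons j r ih =>
    intro M i hi hr
    have hj : j < (M.getD i []).length := hr j (List.mem_cons_self)
    simp only [List.foldl_cons]
    rw [pv_fold_k (List.range Sample.length) (fun k => (Sample.getD k 0) ^ (i + j)) M i j hi hj,
        pv_sum_range (fun s => s ^ (i + j)) Sample]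
    rw [ih _ i (by simpa using hi)
        (by intro j' hj'
            rw [pv_getD_set_self _ _ _ _ hi]
            simpa using hr j' (List.mem_cons_of_mem _ hj'))]
    rw [pv_getD_set_self _ _ _ _ hi, List.set_set]
    rfl

-- replace A's nested loops by independent per-row updates
theorem pv_fold_i (Sample : List Int) (n : Nat) (r : List Nat) :
    ∀ (M : List (List Int)), (∀ i ∈ r, i < M.length) → (∀ i ∈ r, n ≤ (M.getD i []).length) →
    r.foldl (fun M i => (List.range n).foldl (fun M j => (List.range Sample.length).foldl (fun M k =>
        M.set i ((M.getD i []).set j ((M.getD i []).getD j 0 + (Sample.getD k 0) ^ (i + j)))) M) M) M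
      = r.foldl (fun M i => M.set i ((M.getD i []).mapIdx
          (fun j x => if j < n then x + pvS Sample (i + j) else x))) M := by
  induction r with
  | nil => intro M _ _; rfl
  | cons i r ih =>
    intro M h1 h2
    have hi : i < M.length := h1 i (List.mem_cons_self)
    have hni : n ≤ (M.getD i []).length := h2 i (List.mem_cons_self)
    simp only [List.foldl_cons]
    rw [pv_fold_j Sample (List.range n) M i hi
          (fun j hj => lt_of_lt_of_le (List.mem_range.mp hj) hni),
        pv_fold_set_mapIdx (fun j x => x + pvS Sample (i + j)) 0 n (M.getD i []) hni]
    apply ih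
    · intro i' hi'
      simpa using h1 i' (List.mem_cons_of_mem _ hi')
    · intro i' hi'
      by_cases hii : i' = i
      · subst hii
        rw [pv_getD_set_self _ _ _ _ hi]
        simpa using hni
      · rw [pv_getD_set_ne _ _ _ _ _ hii]
        exact h2 i' (List.mem_cons_of_mem _ hi')

-- ===== VERDICT (by name: the statement is the Claim_ definition above) =====
theorem valuesMatrix_spec : Claim_equal_valuesMatrix := by
  intro Matrix Sample _ hpre
  obtain ⟨hne, hn0, hrows⟩ := hpre
  simp only [Spec_valuesMatrix, valuesMatrix, valuesMatrix_alt]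
  have hm : 0 < Matrix.length := List.length_pos_iff.mpr hne
  have hmemD : ∀ i, i < Matrix.length → Matrix.getD i [] ∈ Matrix := by
    intro i hi
    rw [List.getD_eq_getElem _ _ hi]
    exact List.getElem_mem hi
  have hA := pv_fold_i Sample (Matrix.headD []).length (List.range Matrix.length) Matrix
      (fun i hi => List.mem_range.mp hi)
      (fun i hi => hrows _ (hmemD i (List.mem_range.mp hi)))
  rw [hA]
  have hB := pv_fold_set_mapIdx
      (fun i row => row.mapIdx (fun j x => if j < (Matrix.headD []).length then x + pvS Sample (i + j) else x))
      ([] : List Int) Matrix.length Matrix (le_refl _)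
  rw [hB]
  have hmap : Matrix.mapIdx (fun i row => if i < Matrix.length then
        row.mapIdx (fun j x => if j < (Matrix.headD []).length then x + pvS Sample (i + j) else x) else row)
      = Matrix.mapIdx (fun i row => row.mapIdx (fun j x =>
          if j < (Matrix.headD []).length then
            x + ((List.range (Matrix.length + (Matrix.headD []).length - 1)).map
                  (fun e => (Sample.map (fun s => s ^ e)).sum)).getD (i + j) 0
          else x)) := by
    apply pv_mapIdx_congr
    intro i hi
    rw [if_pos hi]
    apply pv_mapIdx_congr
    intro j hj
    by_cases hjn : j < (Matrix.headD []).length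
    · rw [if_pos hjn, if_pos hjn]
      have hij : i + j < Matrix.length + (Matrix.headD []).length - 1 := by omega
      rw [List.getD_eq_getElem _ _ (by simpa using hij)]
      simp [pvS]
    · rw [if_neg hjn, if_neg hjn]
  rw [hmap]
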